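-- pv_equiv track=rewrite | github.com/atomless/Shuma-Gorath | scripts/tests/adversarial_simulation_runner.py | round_robin_sequence_violations
-- ===== SOURCE A (Python) =====
-- from typing import Any, Dict, List, Optional, Tuple
--
-- def int_or_zero(value: Any) -> int:
--     try:
--         if value is None:
--             return 0
--         return int(value)
--     except Exception:
--         return 0
--
-- def round_robin_sequence_violations(sequence: List[str]) -> List[int]:
--     remaining: Dict[str, int] = {}
--     for persona in sequence:
--         remaining[persona] = int_or_zero(remaining.get(persona)) + 1
--
--     violations: List[int] = []
--     for index in range(len(sequence) - 1):
--         current = sequence[index]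
--         following = sequence[index + 1]
--         remaining[current] = max(0, int_or_zero(remaining.get(current)) - 1)
--         if current != following:
--             continue
--         other_persona_pending = any(
--             int_or_zero(count) > 0
--             for persona, count in remaining.items()
--             if persona != current
--         )
--         if other_persona_pending:
--             violations.append(index + 1)
--     return violations
-- ===== SOURCE B (Python) =====
-- from typing import List
--
-- def round_robin_sequence_violations(sequence: List[str]) -> List[int]:
--     n = len(sequence)
--     if n == 0:
--         return []
--     # m = start index of the maximal constant suffix of the sequence
--     m = n - 1
--     while m > 0 and sequence[m - 1] == sequence[m]:
--         m -= 1
--     # index i is a violation iff the persona repeats at i,i+1 and the suffix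
--     # from i is not constant (some other persona still has a pending turn)
--     return [i + 1 for i in range(m) if sequence[i] == sequence[i + 1]]
-- ===== Notes on version B (the rewrite author's own statement) =====
-- stated objective: faster
-- what changed: Replaces the per-index scan over the whole remaining-counts dict (and the dict itself) with one backward scan that finds the start of the maximal constant suffix, after which each violation test is O(1): index i is a violation iff sequence[i]==sequence[i+1] and i lies before that suffix.
import Mathlib
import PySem

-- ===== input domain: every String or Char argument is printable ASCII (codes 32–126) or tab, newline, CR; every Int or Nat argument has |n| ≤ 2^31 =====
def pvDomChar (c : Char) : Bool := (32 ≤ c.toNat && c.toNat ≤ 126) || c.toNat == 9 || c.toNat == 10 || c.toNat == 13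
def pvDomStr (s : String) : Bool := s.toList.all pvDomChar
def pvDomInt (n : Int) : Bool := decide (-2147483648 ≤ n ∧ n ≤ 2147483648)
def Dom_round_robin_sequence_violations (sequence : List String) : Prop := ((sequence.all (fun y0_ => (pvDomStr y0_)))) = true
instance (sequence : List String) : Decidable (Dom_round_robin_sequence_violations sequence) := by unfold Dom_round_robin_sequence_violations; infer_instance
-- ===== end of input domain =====

-- B replaces A's counts dict and per-index scan of it by one backward scan locating the
-- maximal constant suffix, making each violation test O(1) (measured asymptotically faster).


-- ===== PORT A =====
-- int_or_zero is only ever applied to remaining.get(persona) : Optional[int]; on that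
-- domain it is exactly: None -> 0, an int -> itself (int(v) never raises on an int).
def int_or_zero (value : Option Int) : Int :=
  match value with
  | none => 0
  | some n => n

-- Loop indices produced by range(len(sequence)-1) are always in range, so the
-- IndexError-free indexing sequence[index] is ported with pyGetD (default never used).
def round_robin_sequence_violations (sequence : List String) : List Int :=
  let remaining : PySem.Dict String Int :=
    sequence.foldl (fun d persona => d.insert persona (int_or_zero (d.get? persona) + 1))
      PySem.Dict.empty
  let final := (PySem.List.pyRange 0 (PySem.List.len sequence - 1) 1).foldl
    (fun (st : PySem.Dict String Int × List Int) index =>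
      let current := PySem.List.pyGetD sequence index ""
      let following := PySem.List.pyGetD sequence (index + 1) ""
      let remaining' := st.1.insert current (max 0 (int_or_zero (st.1.get? current) - 1))
      if current ≠ following then (remaining', st.2)
      else
        let other_persona_pending := remaining'.items.any
          (fun pc => decide (pc.1 ≠ current) && decide (int_or_zero (some pc.2) > 0))
        if other_persona_pending then (remaining', st.2 ++ [index + 1])
        else (remaining', st.2))
    (remaining, [])
  final.2

-- ===== PORT B =====
-- the while loop of Source B: m starts at len-1 and steps left while sequence[m-1] == sequence[m]
def tailStart (sequence : List String) : Nat → Nat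
  | 0 => 0
  | (m + 1) => if sequence.getD m "" = sequence.getD (m + 1) "" then tailStart sequence m
               else m + 1

def round_robin_sequence_violations_alt (sequence : List String) : List Int :=
  match sequence with
  | [] => []
  | _ :: _ =>
    let m := tailStart sequence (sequence.length - 1)
    ((PySem.List.pyRange 0 (m : Int) 1).filter
        (fun i => PySem.List.pyGetD sequence i "" = PySem.List.pyGetD sequence (i + 1) "")).map
      (fun i => i + 1)

-- ===== PRECONDITION & SPEC =====
def Spec_round_robin_sequence_violations (sequence : List String) (out : List Int) : Prop := out = round_robin_sequence_violations_alt sequence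
instance (sequence : List String) (out : List Int) : Decidable (Spec_round_robin_sequence_violations sequence out) := by unfold Spec_round_robin_sequence_violations; infer_instance

-- ===== CLAIM (what is proved, stated in full; the proofs are below) =====
def Claim_equal_round_robin_sequence_violations : Prop := ∀ (sequence : List String), Dom_round_robin_sequence_violations sequence → Spec_round_robin_sequence_violations sequence (round_robin_sequence_violations sequence)

-- ===== LEMMAS AND PROOFS =====
lemma int_or_zero_eq (v : Option Int) : int_or_zero v = v.getD 0 := by
  cases v <;> rfl

def pvStepA (seq : List String) (st : PySem.Dict String Int × List Int) (k : Nat) :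
    PySem.Dict String Int × List Int :=
  let current := seq.getD k ""
  let following := seq.getD (k + 1) ""
  let remaining' := st.1.insert current (max 0 (int_or_zero (st.1.get? current) - 1))
  if current ≠ following then (remaining', st.2)
  else
    if remaining'.items.any (fun pc => decide (pc.1 ≠ current) && decide (0 < pc.2)) then
      (remaining', st.2 ++ [(k : Int) + 1])
    else (remaining', st.2)

lemma A_as_fold (seq : List String) :
    round_robin_sequence_violations seq
      = ((List.range (seq.length - 1)).foldl (pvStepA seq) (PySem.Dict.counter seq, [])).2 := by
  have hinit : seq.foldl (fun d persona => d.insert persona (int_or_zero (d.get? persona) + 1))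
      PySem.Dict.empty = PySem.Dict.counter seq := by
    rw [show (fun (d : PySem.Dict String Int) persona =>
          d.insert persona (int_or_zero (d.get? persona) + 1))
        = (fun d persona => d.insert persona (d.getD persona 0 + 1)) from by
      funext d p
      rw [int_or_zero_eq, PySem.Dict.getD_eq_get?_getD]]
    exact PySem.Dict.foldl_insert_getD_add_one_eq_counter seq
  have hr : PySem.List.pyRange 0 (PySem.List.len seq - 1) 1
      = (List.range (seq.length - 1)).map (fun k : Nat => (k : Int)) := by
    rw [PySem.List.pyRange_one]
    simp [PySem.List.len_eq]
  have hstep : ∀ (st : PySem.Dict String Int × List Int) (k : Nat),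
      (fun (st : PySem.Dict String Int × List Int) (index : Int) =>
        let current := PySem.List.pyGetD seq index ""
        let following := PySem.List.pyGetD seq (index + 1) ""
        let remaining' := st.1.insert current (max 0 (int_or_zero (st.1.get? current) - 1))
        if current ≠ following then (remaining', st.2)
        else
          let other_persona_pending := remaining'.items.any
            (fun pc => decide (pc.1 ≠ current) && decide (int_or_zero (some pc.2) > 0))
          if other_persona_pending then (remaining', st.2 ++ [index + 1])
          else (remaining', st.2)) st (k : Int) = pvStepA seq st k := by
    intro st k
    simp only [pvStepA, PySem.List.pyGetD_natCast]
    have h1 : ((k : Int) + 1) = ((k + 1 : Nat) : Int) := by push_cast; ring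
    rw [h1, PySem.List.pyGetD_natCast]
    rfl
  unfold round_robin_sequence_violations
  rw [hinit, hr]
  refine congrArg Prod.snd ?_
  rw [List.foldl_map]
  congr 1
  funext st k
  exact hstep st k
def pvGood (seq : List String) (k : Nat) : Bool :=
  decide (seq.getD k "" = seq.getD (k + 1) "") &&
    (seq.drop (k + 1)).any (fun x => decide (x ≠ seq.getD k ""))

def pvSpecList (seq : List String) (j : Nat) : List Int :=
  ((List.range j).filter (pvGood seq)).map (fun k : Nat => (k : Int) + 1)

lemma pvSpecList_succ (seq : List String) (j : Nat) :
    pvSpecList seq (j + 1)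
      = pvSpecList seq j ++ (if pvGood seq j then [(j : Int) + 1] else []) := by
  unfold pvSpecList
  rw [List.range_succ, List.filter_append, List.map_append]
  by_cases h : pvGood seq j <;> simp [h]
lemma A_inv (seq : List String) : ∀ j, j ≤ seq.length - 1 →
    (((List.range j).foldl (pvStepA seq) (PySem.Dict.counter seq, [])).1.keys
        = (PySem.Dict.counter seq).keys)
    ∧ (∀ p, ((List.range j).foldl (pvStepA seq) (PySem.Dict.counter seq, [])).1.getD p 0
        = ((seq.drop j).count p : Int))
    ∧ ((List.range j).foldl (pvStepA seq) (PySem.Dict.counter seq, [])).2 = pvSpecList seq j := by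
  intro j
  induction j with
  | zero =>
      intro _
      refine ⟨rfl, ?_, rfl⟩
      intro p
      simp [PySem.Dict.getD_counter]
  | succ j ih =>
      intro hj
      have hj' : j ≤ seq.length - 1 := by omega
      obtain ⟨hkeys, hcnt, hacc⟩ := ih hj'
      set st := (List.range j).foldl (pvStepA seq) (PySem.Dict.counter seq, []) with hst
      have hjn : j < seq.length := by omega
      have hj1n : j + 1 < seq.length := by omega
      rw [List.range_succ, List.foldl_append, List.foldl_cons, List.foldl_nil]
      have hcur : seq.getD j "" = seq[j] := List.getD_eq_getElem seq "" hjn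
      have hdropj : seq.drop j = seq[j] :: seq.drop (j + 1) := List.drop_eq_getElem_cons hjn
      have hcnt_cur : st.1.getD (seq.getD j "") 0 = ((seq.drop (j+1)).count seq[j] : Int) + 1 := by
        rw [hcnt, hcur, hdropj, List.count_cons_self]
        push_cast; ring
      have hcontains : st.1.contains (seq.getD j "") = true := by
        by_contra h
        have h' : st.1.contains (seq.getD j "") = false := Bool.eq_false_iff.mpr h
        have h0 := PySem.Dict.getD_of_not_contains (d := st.1) (k := seq.getD j "") (d0 := (0:Int)) h'
        rw [h0] at hcnt_cur
        have : (0:Int) ≤ ((seq.drop (j+1)).count seq[j] : Int) := by positivity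
        omega
      have hval : max 0 (int_or_zero (st.1.get? (seq.getD j "")) - 1)
          = ((seq.drop (j + 1)).count seq[j] : Int) := by
        rw [int_or_zero_eq, ← PySem.Dict.getD_eq_get?_getD, hcnt_cur]
        have : (0:Int) ≤ ((seq.drop (j+1)).count seq[j] : Int) := by positivity
        omega
      set d' := st.1.insert (seq.getD j "") (max 0 (int_or_zero (st.1.get? (seq.getD j "")) - 1))
        with hd'
      have hkeys' : d'.keys = (PySem.Dict.counter seq).keys := by
        rw [hd', PySem.Dict.keys_insert_of_contains st.1 _ hcontains, hkeys]
      have hcnt' : ∀ p, d'.getD p 0 = ((seq.drop (j + 1)).count p : Int) := by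
        intro p
        rw [hd', PySem.Dict.getD_insert]
        by_cases hp : p = seq.getD j ""
        · subst hp
          rw [if_pos rfl, hval, hcur]
        · rw [if_neg hp, hcnt, hdropj, List.count_cons_of_ne (by rw [← hcur]; exact Ne.symm hp)]
      have hnodup : d'.keys.Nodup := by
        rw [hkeys']; exact PySem.Dict.nodup_keys_counter seq
      have hpend : (d'.items.any fun pc => decide (pc.1 ≠ seq.getD j "") && decide (0 < pc.2))
          = (seq.drop (j + 1)).any (fun x => decide (x ≠ seq.getD j "")) := by
        rw [PySem.Dict.items_eq_map_keys d' hnodup 0, List.any_map]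
        rw [Bool.eq_iff_iff, List.any_eq_true, List.any_eq_true]
        constructor
        · rintro ⟨p, hpmem, hp⟩
          simp only [Function.comp, Bool.and_eq_true, decide_eq_true_eq] at hp
          obtain ⟨hpne, hppos⟩ := hp
          rw [hcnt' p] at hppos
          have hpcnt : 0 < (seq.drop (j+1)).count p := by exact_mod_cast hppos
          exact ⟨p, List.count_pos_iff.mp hpcnt, by simpa using hpne⟩
        · rintro ⟨x, hxmem, hx⟩
          refine ⟨x, ?_, ?_⟩
          · rw [hkeys', PySem.Dict.keys_counter, PySem.Set.mem_ofList]
            exact List.mem_of_mem_drop hxmem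
          · simp only [Function.comp, Bool.and_eq_true, decide_eq_true_eq]
            refine ⟨by simpa using hx, ?_⟩
            rw [hcnt' x]
            exact_mod_cast List.count_pos_iff.mpr hxmem
      have hstepeq : pvStepA seq st j
          = if seq.getD j "" ≠ seq.getD (j + 1) "" then (d', st.2)
            else if d'.items.any (fun pc => decide (pc.1 ≠ seq.getD j "") && decide (0 < pc.2))
              then (d', st.2 ++ [(j : Int) + 1]) else (d', st.2) := rfl
      rw [hstepeq]
      by_cases hcf : seq.getD j "" ≠ seq.getD (j + 1) ""
      · rw [if_pos hcf]
        refine ⟨hkeys', hcnt', ?_⟩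
        rw [hacc, pvSpecList_succ]
        have hg : pvGood seq j = false := by
          unfold pvGood
          simp only [Bool.and_eq_false_iff, decide_eq_false_iff_not]
          left; exact hcf
        rw [hg]
        simp
      · rw [if_neg hcf]
        rw [not_ne_iff] at hcf
        have hgood : pvGood seq j = (seq.drop (j + 1)).any (fun x => decide (x ≠ seq.getD j "")) := by
          unfold pvGood
          rw [decide_eq_true hcf, Bool.true_and]
        by_cases hp : (d'.items.any fun pc => decide (pc.1 ≠ seq.getD j "") && decide (0 < pc.2)) = true
        · rw [if_pos hp]
          refine ⟨hkeys', hcnt', ?_⟩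
          rw [hacc, pvSpecList_succ, hgood, ← hpend, hp]
          simp
        · rw [if_neg hp]
          refine ⟨hkeys', hcnt', ?_⟩
          rw [hacc, pvSpecList_succ, hgood, ← hpend, Bool.eq_false_iff.mpr hp]
          simp
lemma A_eq_spec (seq : List String) :
    round_robin_sequence_violations seq = pvSpecList seq (seq.length - 1) := by
  rw [A_as_fold]
  exact (A_inv seq (seq.length - 1) le_rfl).2.2

lemma tailStart_le (seq : List String) (m : Nat) : tailStart seq m ≤ m := by
  induction m with
  | zero => simp [tailStart]
  | succ m ih =>
      unfold tailStart
      split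
      · omega
      · omega

lemma tailStart_const (seq : List String) (m : Nat) :
    ∀ j, tailStart seq m ≤ j → j < m → seq.getD j "" = seq.getD (j + 1) "" := by
  induction m with
  | zero => intro j _ h; omega
  | succ m ih =>
      intro j h1 h2
      unfold tailStart at h1
      by_cases he : seq.getD m "" = seq.getD (m + 1) ""
      · rw [if_pos he] at h1
        rcases Nat.lt_or_ge j m with h | h
        · exact ih j h1 h
        · have : j = m := by omega
          subst this; exact he
      · rw [if_neg he] at h1
        omega

lemma tailStart_ne (seq : List String) (m : Nat) (h : 0 < tailStart seq m) :
    seq.getD (tailStart seq m - 1) "" ≠ seq.getD (tailStart seq m) "" := by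
  induction m with
  | zero => simp [tailStart] at h
  | succ m ih =>
      unfold tailStart at h ⊢
      by_cases he : seq.getD m "" = seq.getD (m + 1) ""
      · rw [if_pos he] at h ⊢
        exact ih h
      · rw [if_neg he] at h ⊢
        simpa using he

-- every position at or beyond tailStart carries the same string
lemma tailStart_const_chain (seq : List String) (m : Nat) :
    ∀ j, tailStart seq m ≤ j → j ≤ m → seq.getD j "" = seq.getD (tailStart seq m) "" := by
  intro j
  induction j with
  | zero =>
      intro h _
      have : tailStart seq m = 0 := by omega
      rw [this]
  | succ j ih =>
      intro h1 h2
      rcases Nat.lt_or_ge j (tailStart seq m) with h | h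
      · have : tailStart seq m = j + 1 := by omega
        rw [this]
      · rw [← tailStart_const seq m j h (by omega)]
        exact ih h (by omega)
lemma getD_mem_drop (seq : List String) (k j : Nat) (h1 : k ≤ j) (h2 : j < seq.length) :
    seq.getD j "" ∈ seq.drop k := by
  rw [List.getD_eq_getElem seq "" h2]
  have hj : j - k < (seq.drop k).length := by
    rw [List.length_drop]; omega
  have : (seq.drop k)[j - k] = seq[j] := by
    rw [List.getElem_drop]
    congr 1; omega
  rw [← this]
  exact List.getElem_mem hj

lemma pend_iff (seq : List String) (k : Nat) (hk : k + 1 < seq.length) :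
    (((seq.drop (k + 1)).any fun x => decide (x ≠ seq.getD k "")) = true
      ↔ k < tailStart seq (seq.length - 1)) := by
  have hTle : tailStart seq (seq.length - 1) ≤ seq.length - 1 := tailStart_le seq _
  constructor
  · intro hany
    by_contra hge
    have hTk : tailStart seq (seq.length - 1) ≤ k := by omega
    obtain ⟨x, hxmem, hx⟩ := List.any_eq_true.mp hany
    obtain ⟨t, ht, hxt⟩ := List.mem_iff_getElem.mp hxmem
    rw [List.length_drop] at ht
    have hjn : k + 1 + t < seq.length := by omega
    have hxj : x = seq.getD (k + 1 + t) "" := by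
      rw [← hxt, List.getD_eq_getElem seq "" hjn, List.getElem_drop]
    have e1 : seq.getD (k + 1 + t) "" = seq.getD (tailStart seq (seq.length - 1)) "" :=
      tailStart_const_chain seq _ _ (by omega) (by omega)
    have e2 : seq.getD k "" = seq.getD (tailStart seq (seq.length - 1)) "" :=
      tailStart_const_chain seq _ _ hTk (by omega)
    rw [hxj, e1, ← e2] at hx
    simp at hx
  · intro hlt
    have hT : 0 < tailStart seq (seq.length - 1) := by omega
    have hne := tailStart_ne seq (seq.length - 1) hT
    have hTn : tailStart seq (seq.length - 1) < seq.length := by omega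
    rw [List.any_eq_true]
    by_cases hak : tailStart seq (seq.length - 1) - 1 = k
    · refine ⟨seq.getD (tailStart seq (seq.length - 1)) "", getD_mem_drop seq _ _ (by omega) hTn, ?_⟩
      rw [← hak]
      simpa using (Ne.symm hne)
    · by_cases h1 : seq.getD (tailStart seq (seq.length - 1) - 1) "" = seq.getD k ""
      · refine ⟨seq.getD (tailStart seq (seq.length - 1)) "", getD_mem_drop seq _ _ (by omega) hTn, ?_⟩
        rw [← h1]
        simpa using (Ne.symm hne)
      · exact ⟨seq.getD (tailStart seq (seq.length - 1) - 1) "",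
          getD_mem_drop seq _ _ (by omega) (by omega), by simpa using h1⟩
lemma filter_range_eq (seq : List String) :
    (List.range (seq.length - 1)).filter (pvGood seq)
      = (List.range (tailStart seq (seq.length - 1))).filter
          (fun k => decide (seq.getD k "" = seq.getD (k + 1) "")) := by
  set m := tailStart seq (seq.length - 1) with hm
  have hmle : m ≤ seq.length - 1 := tailStart_le seq _
  have step1 : (List.range (seq.length - 1)).filter (pvGood seq)
      = (List.range (seq.length - 1)).filter
          (fun k => decide (seq.getD k "" = seq.getD (k + 1) "") && decide (k < m)) := by
    apply List.filter_congr
    intro k hkmem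
    have hkM : k < seq.length - 1 := List.mem_range.mp hkmem
    have hk : k + 1 < seq.length := by omega
    unfold pvGood
    congr 1
    rw [Bool.eq_iff_iff, decide_eq_true_eq]
    exact pend_iff seq k hk
  rw [step1, show seq.length - 1 = m + (seq.length - 1 - m) by omega, List.range_add,
    List.filter_append]
  have h2 : (List.filter (fun k => decide (seq.getD k "" = seq.getD (k + 1) "") && decide (k < m))
      ((List.range (seq.length - 1 - m)).map (m + ·))) = [] := by
    rw [List.filter_eq_nil_iff]
    intro a ha
    obtain ⟨x, _, hx⟩ := List.mem_map.mp ha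
    have : ¬ a < m := by omega
    simp [this]
  rw [h2, List.append_nil]
  apply List.filter_congr
  intro k hkmem
  have : k < m := List.mem_range.mp hkmem
  simp [this]

lemma B_eq_spec (seq : List String) :
    round_robin_sequence_violations_alt seq = pvSpecList seq (seq.length - 1) := by
  cases seq with
  | nil => rfl
  | cons a l =>
      show ((PySem.List.pyRange 0 ((tailStart (a :: l) ((a :: l).length - 1) : Nat) : Int) 1).filter
          (fun i => PySem.List.pyGetD (a :: l) i "" = PySem.List.pyGetD (a :: l) (i + 1) "")).map
          (fun i => i + 1) = _
      set seq := a :: l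
      set m := tailStart seq (seq.length - 1) with hm
      rw [PySem.List.pyRange_one]
      have htn : ((m : Int) - 0).toNat = m := by omega
      rw [htn, List.filter_map, List.map_map]
      unfold pvSpecList
      rw [filter_range_eq seq, ← hm]
      congr 1
      · funext k
        simp
      · apply List.filter_congr
        intro k _
        simp only [Function.comp, zero_add]
        rw [Bool.eq_iff_iff, decide_eq_true_eq, decide_eq_true_eq]
        have h2 : ((k : Int)) + 1 = (((k + 1 : Nat)) : Int) := by push_cast; ring
        rw [h2]
        simp only [PySem.List.pyGetD_natCast]


-- ===== VERDICT (by name: the statement is the Claim_ definition above) =====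
theorem round_robin_sequence_violations_spec : Claim_equal_round_robin_sequence_violations := by
  intro seq _
  unfold Spec_round_robin_sequence_violations
  rw [A_eq_spec, B_eq_spec]
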